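-- pv_equiv track=rewrite | github.com/cambridgeltl/ECNMT | BASELINENMT/src/sentence/util.py | filter_bad
-- ===== SOURCE A (Python) =====
-- def filter_bad(src,trg):
--     note = []
--     s_ = set([])
--     for i in range(len(src)):
--         s = str(src[i]) + str(trg[i])
--         if s in s_:
--             note.append(i)
--         else:
--             s_.add(s)
--     return set(note)
-- ===== SOURCE B (Python) =====
-- def filter_bad(src, trg):
--     # Two-phase: first build a dict mapping each combined key to its first index,
--     # then a second pass keeps every index that is not its key's first occurrence.
--     first = {}
--     for i in range(len(src)):
--         key = str(src[i]) + str(trg[i])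
--         if key not in first:
--             first[key] = i
--     return {i for i in range(len(src)) if first[str(src[i]) + str(trg[i])] != i}
-- ===== Notes on version B (the rewrite author's own statement) =====
-- stated objective: alternative
-- what changed: Replaces the online seen-set loop by a two-phase computation: one pass builds a first-occurrence index (dict key -> first index), a second pass over the range keeps every index that is not its key's first occurrence.
import Mathlib
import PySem

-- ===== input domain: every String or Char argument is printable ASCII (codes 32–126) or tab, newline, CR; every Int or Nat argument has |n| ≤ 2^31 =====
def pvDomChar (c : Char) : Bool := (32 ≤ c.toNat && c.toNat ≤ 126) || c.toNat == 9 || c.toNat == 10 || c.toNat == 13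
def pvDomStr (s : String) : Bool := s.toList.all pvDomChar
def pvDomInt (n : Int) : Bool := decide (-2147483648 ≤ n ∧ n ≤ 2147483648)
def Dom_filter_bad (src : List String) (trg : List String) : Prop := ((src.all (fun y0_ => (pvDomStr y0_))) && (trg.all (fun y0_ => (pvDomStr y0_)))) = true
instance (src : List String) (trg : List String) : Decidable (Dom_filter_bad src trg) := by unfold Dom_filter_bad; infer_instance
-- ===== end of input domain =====

-- B replaces A's online seen-set loop by a two-phase computation (first-occurrence dict,
-- then a range filter); same O(n) cost, equality of the returned value is proved below.

-- ===== PORT A =====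
def filter_bad (src : List String) (trg : List String) : List Int :=
  let st := (PySem.List.pyRange 0 (PySem.List.len src) 1).foldl
    (fun (st : List Int × PySem.Set String) i =>
      let s := (PySem.List.pyGetD src i "") ++ (PySem.List.pyGetD trg i "")
      if PySem.Set.contains st.2 s then (st.1 ++ [i], st.2)
      else (st.1, PySem.Set.add st.2 s))
    ([], PySem.Set.empty)
  PySem.Set.ofList st.1

-- ===== PORT B =====
def filter_bad_alt (src : List String) (trg : List String) : List Int :=
  let first := (PySem.List.pyRange 0 (PySem.List.len src) 1).foldl
    (fun (d : PySem.Dict String Int) i =>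
      let key := (PySem.List.pyGetD src i "") ++ (PySem.List.pyGetD trg i "")
      if (PySem.Dict.get? d key).isSome then d else PySem.Dict.insert d key i)
    PySem.Dict.empty
  -- first[key] in Source B: the key is always present, so the default -1 is never used
  PySem.Set.ofList ((PySem.List.pyRange 0 (PySem.List.len src) 1).filter
    (fun i => PySem.Dict.getD first ((PySem.List.pyGetD src i "") ++ (PySem.List.pyGetD trg i "")) (-1) != i))

-- ===== PRECONDITION & SPEC =====
-- Pre_ excludes exactly the inputs where Python A raises IndexError: trg shorter than src.
def Pre_filter_bad (src : List String) (trg : List String) : Prop := src.length ≤ trg.length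
instance (src : List String) (trg : List String) : Decidable (Pre_filter_bad src trg) := by unfold Pre_filter_bad; infer_instance
def pvWitness_filter_bad : List String × List String := (["a", "b", "a"], ["x", "y", "x"])
def Spec_filter_bad (src : List String) (trg : List String) (out : List Int) : Prop := out = filter_bad_alt src trg
instance (src : List String) (trg : List String) (out : List Int) : Decidable (Spec_filter_bad src trg out) := by unfold Spec_filter_bad; infer_instance

-- ===== CLAIM (what is proved, stated in full; the proofs are below) =====
def Claim_equal_filter_bad : Prop := ∀ (src : List String) (trg : List String), Dom_filter_bad src trg → Pre_filter_bad src trg → Spec_filter_bad src trg (filter_bad src trg)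

-- ===== LEMMAS AND PROOFS =====

-- the combined key str(src[i]) + str(trg[i])
def pvKey (src trg : List String) (i : Int) : String :=
  (PySem.List.pyGetD src i "") ++ (PySem.List.pyGetD trg i "")

-- "index i repeats an earlier key"
def pvDup (src trg : List String) (i : Int) : Bool :=
  (PySem.List.pyRange 0 i 1).any (fun j => pvKey src trg j == pvKey src trg i)

theorem pvOfList_append_singleton (xs : List String) (x : String) :
    PySem.Set.ofList (xs ++ [x]) = PySem.Set.add (PySem.Set.ofList xs) x := by
  simp [PySem.Set.ofList_eq_foldl, List.foldl_append]

theorem pvKey_fold (src trg : List String) (i : Int) :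
    (PySem.List.pyGetD src i "") ++ (PySem.List.pyGetD trg i "") = pvKey src trg i := rfl

theorem pvContains_ofList_map (src trg : List String) (l : List Int) (i : Int) :
    PySem.Set.contains (PySem.Set.ofList (l.map (pvKey src trg))) (pvKey src trg i)
      = l.any (fun j => pvKey src trg j == pvKey src trg i) := by
  rw [Bool.eq_iff_iff]
  simp only [PySem.Set.contains, List.contains_eq_mem, decide_eq_true_eq, List.any_eq_true,
    beq_iff_eq]
  rw [PySem.Set.mem_ofList]
  simp [List.mem_map, eq_comm]

-- invariant of A's loop: after the first m indices, note is the list of duplicate indices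
-- (in order) and the seen-set holds the keys of the first m indices
theorem pvALoop (src trg : List String) (m : Nat) :
    (PySem.List.pyRange 0 (m : Int) 1).foldl
      (fun (st : List Int × PySem.Set String) i =>
        if PySem.Set.contains st.2 (pvKey src trg i) then (st.1 ++ [i], st.2)
        else (st.1, PySem.Set.add st.2 (pvKey src trg i)))
      ([], PySem.Set.empty)
    = ((PySem.List.pyRange 0 (m : Int) 1).filter (pvDup src trg),
       PySem.Set.ofList ((PySem.List.pyRange 0 (m : Int) 1).map (pvKey src trg))) := by
  induction m with
  | zero => simp [PySem.Set.ofList, PySem.Set.empty]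
  | succ m ih =>
    have hm : ((m + 1 : Nat) : Int) = (m : Int) + 1 := by push_cast; ring
    rw [hm, PySem.List.pyRange_one_succ_right (Int.natCast_nonneg m),
        List.foldl_append, ih, List.filter_append, List.map_append]
    simp only [List.foldl_cons, List.foldl_nil, List.filter_cons, List.filter_nil,
      List.map_cons, List.map_nil]
    have hpd : (PySem.List.pyRange 0 (m : Int) 1).any
        (fun j => pvKey src trg j == pvKey src trg (m : Int)) = pvDup src trg (m : Int) := rfl
    rw [pvContains_ofList_map src trg _ (m : Int), hpd, pvOfList_append_singleton]
    simp only [PySem.Set.add]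
    rw [pvContains_ofList_map src trg _ (m : Int), hpd]
    cases hd : pvDup src trg (m : Int) <;> simp

-- B's first pass: the dict maps k to the first index in l whose key is k
theorem pvBDict (src trg : List String) (l : List Int) (d : PySem.Dict String Int) (k : String) :
    PySem.Dict.get?
      (l.foldl
        (fun (d : PySem.Dict String Int) i =>
          if (PySem.Dict.get? d (pvKey src trg i)).isSome then d
          else PySem.Dict.insert d (pvKey src trg i) i)
        d) k
    = match PySem.Dict.get? d k with
      | some v => some v
      | none => l.find? (fun i => pvKey src trg i == k) := by
  induction l generalizing d with
  | nil => cases h : PySem.Dict.get? d k <;> simp [h]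
  | cons i l ih =>
    rw [List.foldl_cons]
    by_cases h1 : (PySem.Dict.get? d (pvKey src trg i)).isSome
    · rw [if_pos h1, ih]
      cases h2 : PySem.Dict.get? d k with
      | some v => rfl
      | none =>
        have hne : (pvKey src trg i == k) = false := by
          apply beq_eq_false_iff_ne.mpr
          intro he; rw [he] at h1; rw [h2] at h1; simp at h1
        simp [hne]
    · rw [if_neg h1]
      have h1' : PySem.Dict.get? d (pvKey src trg i) = none :=
        Option.not_isSome_iff_eq_none.mp h1
      by_cases h3 : pvKey src trg i = k
      · subst h3
        rw [ih, PySem.Dict.get?_insert_self, h1']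
        simp
      · rw [ih, PySem.Dict.get?_insert_of_ne d i (Ne.symm h3)]
        have hne : (pvKey src trg i == k) = false := beq_eq_false_iff_ne.mpr h3
        cases h2 : PySem.Dict.get? d k <;> simp [hne]

-- B's second pass tests exactly "i repeats an earlier key"
theorem pvBVal (src trg : List String) (n : Nat) (i : Int) (h0 : 0 ≤ i) (hn : i < (n : Int)) :
    (PySem.Dict.getD
      ((PySem.List.pyRange 0 (n : Int) 1).foldl
        (fun (d : PySem.Dict String Int) j =>
          if (PySem.Dict.get? d (pvKey src trg j)).isSome then d
          else PySem.Dict.insert d (pvKey src trg j) j)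
        PySem.Dict.empty)
      (pvKey src trg i) (-1) != i) = pvDup src trg i := by
  rw [PySem.Dict.getD_eq_get?_getD, pvBDict, PySem.Dict.get?_empty]
  rw [PySem.List.pyRange_one_append 0 i (n : Int) h0 (le_of_lt hn), List.find?_append]
  cases hf : (PySem.List.pyRange 0 i 1).find? (fun j => pvKey src trg j == pvKey src trg i) with
  | some j₀ =>
    have hj₀ : j₀ ∈ PySem.List.pyRange 0 i 1 := List.mem_of_find?_eq_some hf
    have hlt : j₀ < i := ((PySem.List.mem_pyRange_one).mp hj₀).2
    have hdup : pvDup src trg i = true := by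
      unfold pvDup
      rw [List.any_eq_true]
      exact ⟨j₀, hj₀, List.find?_some (p := fun j => pvKey src trg j == pvKey src trg i) hf⟩
    have hji : j₀ ≠ i := by omega
    simp [hdup, hji]
  | none =>
    have hdup : pvDup src trg i = false := by
      unfold pvDup
      rw [List.any_eq_false]
      intro j hj
      have := List.find?_eq_none.mp hf j hj
      simpa using this
    rw [PySem.List.pyRange_one_cons hn, List.find?_cons]
    simp [hdup]

-- ===== VERDICT (by name: the statement is the Claim_ definition above) =====
theorem filter_bad_spec : Claim_equal_filter_bad := by
  intro src trg _ _
  unfold Spec_filter_bad filter_bad filter_bad_alt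
  simp only [PySem.List.len_eq, pvKey_fold]
  rw [pvALoop src trg src.length]
  congr 1
  apply List.filter_congr
  intro i hi
  have h1 : 0 ≤ i := ((PySem.List.mem_pyRange_one).mp hi).1
  have h2 : i < (src.length : Int) := ((PySem.List.mem_pyRange_one).mp hi).2
  exact (pvBVal src trg src.length i h1 h2).symm
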